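-- pv_equiv track=rewrite | github.com/ZhongJing0121/LeetCode | LeetCode_1351/py_02/Solution.py | search_first_negative_number
-- ===== SOURCE A (Python) =====
-- from typing import List
--
-- def search_first_negative_number(nums: List[int]) -> int:
--     """
--     查找数组中第一个出现的负数
--     """
--     left, right, index = 0, len(nums) - 1, -1
--     while left <= right:
--         mid = left + ((right - left) >> 1)
--         # 如果num[mid]>=0，那么位置一定在mid的右边
--         if nums[mid] >= 0:
--             left = mid + 1
--         # 如果mid小于0，位置一定在mid的左边，也有可能是mid
--         else:
--             index = mid
--             right = mid - 1
--     return index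
-- ===== SOURCE B (Python) =====
-- from typing import List
--
-- def search_first_negative_number(nums: List[int]) -> int:
--     """Recursive descent over half-open intervals returning Optional[int]."""
--     def descend(lo: int, hi: int):  # searches [lo, hi)
--         if lo >= hi:
--             return None
--         mid = (lo + hi - 1) // 2
--         if nums[mid] >= 0:
--             return descend(mid + 1, hi)
--         found = descend(lo, mid)
--         return mid if found is None else found
--     result = descend(0, len(nums))
--     return -1 if result is None else result
-- ===== Notes on version B (the rewrite author's own statement) =====
-- stated objective: alternative
-- what changed: Replaced the iterative loop that threads a candidate-index accumulator through closed intervals [left,right] by a recursive descent over half-open intervals [lo,hi) that returns Optional[int] (None for not-found), computes mid as (lo+hi-1)//2, and combines the left-half result with mid on the way back up; -1 is produced only at the top-level conversion from None.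
import Mathlib
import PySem

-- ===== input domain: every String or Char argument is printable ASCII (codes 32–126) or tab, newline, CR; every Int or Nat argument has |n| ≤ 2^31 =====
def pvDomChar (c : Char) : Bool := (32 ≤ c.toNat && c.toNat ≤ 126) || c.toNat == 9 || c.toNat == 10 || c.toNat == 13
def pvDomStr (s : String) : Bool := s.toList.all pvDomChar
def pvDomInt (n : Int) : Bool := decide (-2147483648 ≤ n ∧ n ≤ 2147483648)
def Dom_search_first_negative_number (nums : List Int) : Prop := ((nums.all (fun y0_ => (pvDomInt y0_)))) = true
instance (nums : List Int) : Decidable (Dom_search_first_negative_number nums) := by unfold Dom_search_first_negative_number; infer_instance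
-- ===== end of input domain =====

-- B is an alternative decomposition: an Option-returning recursive descent over
-- half-open intervals instead of a loop threading a candidate-index accumulator.

-- ===== PORT A =====
-- while-loop of A: state (left, right, index). The fuel parameter only makes the
-- recursion structural: each iteration shrinks the interval [left,right] by at
-- least one, so the initial fuel nums.length + 1 is never exhausted.
-- nums[mid] is always in range when left ≤ right, so pyGetD's default is unused.
def pvLoopA (nums : List Int) : Nat → Int → Int → Int → Int
  | 0, _, _, index => index
  | fuel + 1, left, right, index =>
    if left ≤ right then
      let mid := left + PySem.Int.floordiv (right - left) 2
      if PySem.List.pyGetD nums mid 0 ≥ 0 then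
        pvLoopA nums fuel (mid + 1) right index
      else
        pvLoopA nums fuel left (mid - 1) mid
    else index

def search_first_negative_number (nums : List Int) : Int :=
  pvLoopA nums (nums.length + 1) 0 ((nums.length : Int) - 1) (-1)

-- ===== PORT B =====
-- descend searches the half-open interval [lo, hi); none means no negative found.
-- The fuel parameter only makes the recursion structural (each call shrinks the
-- interval, so fuel nums.length + 1 is never exhausted); nums[mid] is in range
-- whenever lo < hi inside 0 ≤ lo, hi ≤ len, so pyGetD's default is unused.
def pvDescendB (nums : List Int) : Nat → Int → Int → Option Int
  | 0, _, _ => none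
  | fuel + 1, lo, hi =>
    if lo ≥ hi then none
    else
      let mid := PySem.Int.floordiv (lo + hi - 1) 2
      if PySem.List.pyGetD nums mid 0 ≥ 0 then
        pvDescendB nums fuel (mid + 1) hi
      else
        match pvDescendB nums fuel lo mid with
        | none => some mid
        | some found => some found

def search_first_negative_number_alt (nums : List Int) : Int :=
  match pvDescendB nums (nums.length + 1) 0 (nums.length : Int) with
  | none => -1
  | some result => result

-- ===== PRECONDITION & SPEC =====
def Spec_search_first_negative_number (nums : List Int) (out : Int) : Prop := out = search_first_negative_number_alt nums
instance (nums : List Int) (out : Int) : Decidable (Spec_search_first_negative_number nums out) := by unfold Spec_search_first_negative_number; infer_instance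

-- ===== CLAIM (what is proved, stated in full; the proofs are below) =====
def Claim_equal_search_first_negative_number : Prop := ∀ (nums : List Int), Dom_search_first_negative_number nums → Spec_search_first_negative_number nums (search_first_negative_number nums)

-- ===== LEMMAS AND PROOFS =====

-- Both versions make the same probes: A's mid = left + (right-left)//2 equals
-- B's mid = (lo+hi-1)//2 at hi = right+1.  With the SAME fuel on both sides, the
-- accumulator loop on [left,right] equals getD of the descent on [left,right+1).
theorem pvLoopA_eq (nums : List Int) (fuel : Nat) (left right index : Int) :
    pvLoopA nums fuel left right index = (pvDescendB nums fuel left (right + 1)).getD index := by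
  induction fuel generalizing left right index with
  | zero => rfl
  | succ fuel ih =>
    rw [pvLoopA, pvDescendB]
    by_cases h : left ≤ right
    · rw [if_pos h, if_neg (by omega : ¬ left ≥ right + 1)]
      have hfA : PySem.Int.floordiv (right - left) 2 = (right - left) / 2 :=
        PySem.Int.floordiv_eq_ediv_of_pos (by omega)
      have hfB : PySem.Int.floordiv (left + (right + 1) - 1) 2 = (left + right) / 2 := by
        rw [PySem.Int.floordiv_eq_ediv_of_pos (by omega)]; ring_nf
      simp only [hfA, hfB]
      have hmid : left + (right - left) / 2 = (left + right) / 2 := by omega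
      rw [hmid]
      by_cases hge : PySem.List.pyGetD nums ((left + right) / 2) 0 ≥ 0
      · rw [if_pos hge, if_pos hge]
        exact ih ((left + right) / 2 + 1) right index
      · rw [if_neg hge, if_neg hge]
        rw [ih left ((left + right) / 2 - 1) ((left + right) / 2),
          show (left + right) / 2 - 1 + 1 = (left + right) / 2 from by omega]
        cases pvDescendB nums fuel left ((left + right) / 2) <;> rfl
    · rw [if_neg h, if_pos (by omega : left ≥ right + 1)]
      rfl

-- ===== VERDICT (by name: the statement is the Claim_ definition above) =====
theorem search_first_negative_number_spec : Claim_equal_search_first_negative_number := by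
  intro nums _
  unfold Spec_search_first_negative_number search_first_negative_number search_first_negative_number_alt
  rw [pvLoopA_eq nums (nums.length + 1) 0 ((nums.length : Int) - 1) (-1),
    show (nums.length : Int) - 1 + 1 = (nums.length : Int) from by omega]
  cases pvDescendB nums (nums.length + 1) 0 (nums.length : Int) <;> rfl
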